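-- pv_equiv track=rewrite | github.com/dfremont/counting-benchmarks | scripts/makeBenchmarkList.py | isABenchmark
-- ===== SOURCE A (Python) =====
-- benchmarkExtensions = ['.cnf', '.dimacs']
--
-- compressionExtensions = ['.gz']
--
-- def isABenchmark(filename):
-- 	for ext in compressionExtensions:
-- 		if filename.endswith(ext):
-- 			newLen = len(filename) - len(ext)
-- 			filename = filename[:newLen]
-- 			break
-- 	for ext in benchmarkExtensions:
-- 		if filename.endswith(ext):
-- 			return True
-- 	return False
-- ===== SOURCE B (Python) =====
-- # Precompute the full accepted suffix table (benchmark exts x optional compression ext)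
-- # and test the filename against it in a single endswith call: no stripping, no loops.
-- BENCHMARK_SUFFIXES = ('.cnf', '.dimacs', '.cnf.gz', '.dimacs.gz')
--
-- def isABenchmark(filename):
--     return filename.endswith(BENCHMARK_SUFFIXES)
-- ===== Notes on version B (the rewrite author's own statement) =====
-- stated objective: simpler
-- what changed: Instead of stripping one compression suffix and then looping over benchmark extensions, B precomputes the cross product of benchmark and optional compression suffixes ('.cnf', '.dimacs', '.cnf.gz', '.dimacs.gz') and answers with a single endswith over that table.
import Mathlib
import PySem

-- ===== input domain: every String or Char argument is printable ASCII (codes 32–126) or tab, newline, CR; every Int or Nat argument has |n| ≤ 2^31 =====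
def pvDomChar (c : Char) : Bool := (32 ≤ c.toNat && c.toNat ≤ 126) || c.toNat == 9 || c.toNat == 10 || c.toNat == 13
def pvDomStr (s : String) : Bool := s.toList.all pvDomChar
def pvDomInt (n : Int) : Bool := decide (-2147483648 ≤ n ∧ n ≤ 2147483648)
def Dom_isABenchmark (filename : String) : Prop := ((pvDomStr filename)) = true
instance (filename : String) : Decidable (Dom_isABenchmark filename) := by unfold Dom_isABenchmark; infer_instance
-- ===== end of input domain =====

-- B replaces A's strip-compression-suffix-then-loop logic by a single endswith over the
-- precomputed table of full accepted suffixes; objective: simpler.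


-- ===== PORT A =====
def benchmarkExtensions : List String := [".cnf", ".dimacs"]

def compressionExtensions : List String := [".gz"]

-- first loop of A: strip the first matching compression extension (break), else keep filename
def pvStripLoop (filename : String) : List String → String
  | [] => filename
  | ext :: rest =>
    if PySem.Str.endswith filename ext then
      PySem.Str.slice filename none (some ((PySem.Str.len filename : Int) - (PySem.Str.len ext : Int)))
    else pvStripLoop filename rest

-- second loop of A: return True on the first matching benchmark extension, else False
def pvCheckLoop (filename : String) : List String → Bool
  | [] => false
  | ext :: rest => if PySem.Str.endswith filename ext then true else pvCheckLoop filename rest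

def isABenchmark (filename : String) : Bool :=
  pvCheckLoop (pvStripLoop filename compressionExtensions) benchmarkExtensions

-- ===== PORT B =====
def pvBenchmarkSuffixes : List String := [".cnf", ".dimacs", ".cnf.gz", ".dimacs.gz"]

def isABenchmark_alt (filename : String) : Bool :=
  pvBenchmarkSuffixes.any (fun suf => PySem.Str.endswith filename suf)

-- ===== PRECONDITION & SPEC =====
def Spec_isABenchmark (filename : String) (out : Bool) : Prop := out = isABenchmark_alt filename
instance (filename : String) (out : Bool) : Decidable (Spec_isABenchmark filename out) := by unfold Spec_isABenchmark; infer_instance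

-- ===== CLAIM (what is proved, stated in full; the proofs are below) =====
def Claim_equal_isABenchmark : Prop := ∀ (filename : String), Dom_isABenchmark filename → Spec_isABenchmark filename (isABenchmark filename)

-- ===== LEMMAS AND PROOFS =====

-- stripping a known suffix p and then asking for suffix q = asking for suffix q ++ p
lemma suffix_take_iff {α : Type} (l p q : List α) (h : p <:+ l) :
    (q <:+ l.take (l.length - p.length)) ↔ (q ++ p <:+ l) := by
  obtain ⟨t, rfl⟩ := h
  have ht : (t ++ p).take ((t ++ p).length - p.length) = t := by
    simp
  rw [ht]
  constructor
  · rintro ⟨u, rfl⟩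
    exact ⟨u, by simp⟩
  · rintro ⟨u, hu⟩
    refine ⟨u, ?_⟩
    have := List.append_cancel_right (by simpa [List.append_assoc] using hu :
      u ++ q ++ p = t ++ p)
    exact this

-- two suffixes of the same list are comparable; used to rule out cross cases
lemma not_suffix_of_suffix {α : Type} [DecidableEq α] (l p q : List α)
    (hp : p <:+ l) (h1 : ¬ p <:+ q) (h2 : ¬ q <:+ p) : ¬ q <:+ l := by
  intro hq
  rcases List.suffix_or_suffix_of_suffix hp hq with h | h
  · exact h1 h
  · exact h2 h

theorem isABenchmark_eq_alt (filename : String) :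
    isABenchmark filename = isABenchmark_alt filename := by
  unfold isABenchmark isABenchmark_alt pvBenchmarkSuffixes benchmarkExtensions compressionExtensions
  simp only [pvStripLoop, pvCheckLoop, List.any_cons, List.any_nil]
  by_cases hgz : PySem.Str.endswith filename ".gz" = true
  · simp only [hgz, if_pos]
    have hsuf : (".gz").toList <:+ filename.toList := by
      have := (PySem.Chars.endswith_iff (s := filename.toList) (p := (".gz").toList)).mp
        (by simpa using hgz)
      exact this
    have hlen3 : 3 ≤ filename.toList.length := by
      have := hsuf.length_le; simpa using this
    have hslice : (PySem.Str.slice filename none (some ((PySem.Str.len filename : Int) - (PySem.Str.len ".gz" : Int)))).toList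
        = filename.toList.take (filename.toList.length - 3) := by
      have hlen : (PySem.Str.len filename : Int) - (PySem.Str.len ".gz" : Int)
          = ((filename.toList.length - 3 : Nat) : Int) := by
        have h3 : (".gz").toList.length = 3 := by decide
        simp only [PySem.Str.len, h3]
        omega
      rw [hlen]
      simp [PySem.List.slice_to_natCast]
    simp only [PySem.Str.endswith_eq, hslice]
    have key1 := suffix_take_iff filename.toList (".gz").toList (".cnf").toList hsuf
    have key2 := suffix_take_iff filename.toList (".gz").toList (".dimacs").toList hsuf
    simp only [show (".gz").toList.length = 3 from by decide,
      show (".cnf").toList ++ (".gz").toList = (".cnf.gz").toList from by decide] at key1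
    simp only [show (".gz").toList.length = 3 from by decide,
      show (".dimacs").toList ++ (".gz").toList = (".dimacs.gz").toList from by decide] at key2
    have hncnf : ¬ (".cnf").toList <:+ filename.toList :=
      not_suffix_of_suffix _ _ _ hsuf (by decide) (by decide)
    have hndim : ¬ (".dimacs").toList <:+ filename.toList :=
      not_suffix_of_suffix _ _ _ hsuf (by decide) (by decide)
    rw [Bool.eq_iff_iff]
    simp only [Bool.or_eq_true, decide_eq_true_eq, Bool.if_true_left, PySem.Chars.endswith_iff]
    constructor
    · rintro (h | h | h)
      · exact Or.inr (Or.inr (Or.inl (key1.mp h)))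
      · exact Or.inr (Or.inr (Or.inr (Or.inl (key2.mp h))))
      · cases h
    · rintro (h | h | h | h | h)
      · exact absurd h hncnf
      · exact absurd h hndim
      · exact Or.inl (key1.mpr h)
      · exact Or.inr (Or.inl (key2.mpr h))
      · cases h
  · simp only [hgz, if_neg, Bool.false_eq_true, not_false_iff]
    have hngz : ¬ (".gz").toList <:+ filename.toList := by
      intro h
      exact hgz (by simpa using (PySem.Chars.endswith_iff (s := filename.toList) (p := (".gz").toList)).mpr h)
    have hn1 : ¬ (".cnf.gz").toList <:+ filename.toList := by
      intro h; exact hngz (List.IsSuffix.trans (by decide) h)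
    have hn2 : ¬ (".dimacs.gz").toList <:+ filename.toList := by
      intro h; exact hngz (List.IsSuffix.trans (by decide) h)
    rw [Bool.eq_iff_iff]
    simp only [PySem.Str.endswith_eq, Bool.or_eq_true, decide_eq_true_eq, Bool.if_true_left,
      PySem.Chars.endswith_iff]
    constructor
    · rintro (h | h | h)
      · exact Or.inl h
      · exact Or.inr (Or.inl h)
      · cases h
    · rintro (h | h | h | h | h)
      · exact Or.inl h
      · exact Or.inr (Or.inl h)
      · exact absurd h hn1
      · exact absurd h hn2
      · cases h

-- ===== VERDICT (by name: the statement is the Claim_ definition above) =====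
theorem isABenchmark_spec : Claim_equal_isABenchmark := by
  intro filename _
  exact isABenchmark_eq_alt filename
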